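-- pv_equiv track=rewrite | github.com/indiaprince/Algorithms | 2960_acmicpc.py | Prime_func
-- ===== SOURCE A (Python) =====
-- def Prime_func(N,K):
--     Prime = []
--     cnt = 0
--     isPrime = [True for _ in range(N+1)]
--     for i in range(2,N+1):
--         if(isPrime[i]): Prime.append(i)
--         for j in range(i,N+1,i):
--             if(not isPrime[j]) : continue
--             isPrime[j] = False
--             cnt+=1
--             if(cnt==K) : return j
-- ===== SOURCE B (Python) =====
-- def Prime_func(N, K):
--     if K < 1 or K > N - 1:
--         return None
--
--     def spf(n):
--         d = 2
--         while d * d <= n: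
--             if n % d == 0:
--                 return d
--             d += 1
--         return n
--
--     k = K
--     for p in range(2, N + 1):
--         block = [n for n in range(p, N + 1, p) if spf(n) == p]
--         if k <= len(block):
--             return block[k - 1]
--         k -= len(block)
-- ===== Notes on version B (the rewrite author's own statement) =====
-- stated objective: alternative
-- what changed: A runs the sieve with a mutable crossed-out table and a counter that early-returns at the K-th crossing; B has no table and no per-crossing counter: it computes each number's smallest prime factor by trial division, forms for each p = 2..N the block of multiples of p whose smallest prime factor is p (the numbers crossed in pass p, ascending), and locates the K-th removal by skipping whole blocks by their length, returning None when K is outside 1..N-1.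
import Mathlib
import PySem

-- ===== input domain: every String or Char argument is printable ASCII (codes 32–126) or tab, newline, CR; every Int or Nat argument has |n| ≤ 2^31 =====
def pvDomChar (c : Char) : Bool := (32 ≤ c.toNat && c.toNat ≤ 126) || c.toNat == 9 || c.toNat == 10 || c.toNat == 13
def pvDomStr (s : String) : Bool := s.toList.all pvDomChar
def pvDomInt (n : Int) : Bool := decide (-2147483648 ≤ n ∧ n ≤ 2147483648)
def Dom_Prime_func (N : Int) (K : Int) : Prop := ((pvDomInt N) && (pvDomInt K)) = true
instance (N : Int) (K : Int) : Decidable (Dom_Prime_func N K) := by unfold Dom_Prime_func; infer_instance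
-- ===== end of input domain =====

-- B replaces A's mutable sieve-with-counter by a pure computation: the numbers crossed in pass p
-- are exactly the multiples of p whose smallest prime factor (trial division) is p, taken in
-- ascending order; B walks these groups for p = 2..N, skipping whole groups by their length.

-- ===== PORT A =====
-- Python's isPrime list is ported as Array Bool (O(1) access; every index read or written is the
-- always-in-range 2 ≤ j ≤ N, so getD/setIfInBounds perform exactly Python's reads and writes).
-- inner loop 'for j in range(i, N+1, i): …' ; .inr j = 'return j', .inl = fall through
def innerA (K : Int) : List Int → Array Bool → Int → (Array Bool × Int) ⊕ Int
  | [], isP, cnt => .inl (isP, cnt)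
  | j :: js, isP, cnt =>
    if (isP.getD j.toNat false) = false then innerA K js isP cnt
    else
      let isP' := isP.setIfInBounds j.toNat false
      if cnt + 1 = K then .inr j
      else innerA K js isP' (cnt + 1)

-- outer loop 'for i in range(2, N+1): …' (prime = the write-only Prime list)
def outerA (N K : Int) : List Int → Array Bool → Int → List Int → Option Int
  | _, _, _, [] => none
  | prime, isP, cnt, i :: rest =>
    let prime' := if isP.getD i.toNat false then prime ++ [i] else prime
    match innerA K (PySem.List.pyRange i (N + 1) i) isP cnt with
    | .inr j => some j
    | .inl (isP', cnt') => outerA N K prime' isP' cnt' rest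

def Prime_func (N : Int) (K : Int) : Option Int :=
  outerA N K [] (Array.replicate (N + 1).toNat true) 0 (PySem.List.pyRange 2 (N + 1) 1)

-- ===== PORT B =====
-- spf(n): 'd = 2; while d*d <= n: if n % d == 0: return d; d += 1; return n'
def spfAux (n : Int) (d : Int) : Int :=
  if d * d ≤ n then
    if PySem.Int.mod n d = 0 then d
    else spfAux n (d + 1)
  else n
termination_by (n + 1 - d).toNat
decreasing_by
  have hdn : d ≤ n := by nlinarith [mul_self_nonneg d, mul_self_nonneg (d - 1)]
  omega

-- 'for p in range(2, N+1): block = [n for n in range(p, N+1, p) if spf(n) == p]; …'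
def selB (N : Int) : Int → List Int → Option Int
  | _, [] => none
  | k, p :: ps =>
    let block := (PySem.List.pyRange p (N + 1) p).filter (fun n => decide (spfAux n 2 = p))
    if k ≤ (block.length : Int) then PySem.List.pyGet? block (k - 1)
    else selB N (k - (block.length : Int)) ps

def Prime_func_alt (N : Int) (K : Int) : Option Int :=
  if K < 1 ∨ N - 1 < K then none
  else selB N K (PySem.List.pyRange 2 (N + 1) 1)

-- ===== PRECONDITION & SPEC =====
def Spec_Prime_func (N : Int) (K : Int) (out : Option Int) : Prop := out = Prime_func_alt N K
instance (N : Int) (K : Int) (out : Option Int) : Decidable (Spec_Prime_func N K out) := by unfold Spec_Prime_func; infer_instance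

-- ===== CLAIM (what is proved, stated in full; the proofs are below) =====
def Claim_equal_Prime_func : Prop := ∀ (N : Int) (K : Int), Dom_Prime_func N K → Spec_Prime_func N K (Prime_func N K)

-- ===== LEMMAS AND PROOFS =====

-- ghost definitions used only by the proofs
def spf (n : Int) : Int := spfAux n 2

def blockL (N i : Int) : List Int :=
  (PySem.List.pyRange i (N + 1) i).filter (fun j => decide (spf j = i))

def blocksL (N : Int) : List Int → List Int
  | [] => []
  | i :: is => blockL N i ++ blocksL N is

def peek (L : List Int) (cnt K : Int) : Option Int :=
  if cnt < K then L[(K - cnt - 1).toNat]? else none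

-- spf = the least divisor ≥ 2 (trial division is correct)
lemma spfAux_spec (n : Int) (hn : 2 ≤ n) (d : Int) (hd : 2 ≤ d)
    (hmin : ∀ e, 2 ≤ e → e < d → ¬ e ∣ n) :
    2 ≤ spfAux n d ∧ spfAux n d ∣ n ∧ ∀ e, 2 ≤ e → e ∣ n → spfAux n d ≤ e := by
  revert hd hmin
  fun_induction spfAux n d with
  | case1 d hdd hmod =>
    intro hd hmin
    refine ⟨hd, (PySem.Int.mod_eq_zero_iff_dvd n d).mp hmod, ?_⟩
    intro e he hedvd
    by_contra hlt
    exact hmin e he (by omega) hedvd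
  | case2 d hdd hmod ih =>
    intro hd hmin
    refine ih (by omega) ?_
    intro e he hed hedvd
    rcases lt_or_eq_of_le (by omega : e ≤ d) with h | h
    · exact hmin e he h hedvd
    · subst h; exact hmod ((PySem.Int.mod_eq_zero_iff_dvd n e).mpr hedvd)
  | case3 d hdd =>
    intro hd hmin
    refine ⟨hn, dvd_refl n, ?_⟩
    intro e he hedvd
    by_contra hlt
    have hlt' : e < n := by omega
    have hde : d ≤ e := by
      by_contra h; exact hmin e he (by omega) hedvd
    obtain ⟨f, hf⟩ := hedvd
    have hf2 : 2 ≤ f := by nlinarith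
    have hfd : f ∣ n := ⟨e, by rw [hf, mul_comm]⟩
    have hdf : d ≤ f := by
      by_contra h; exact hmin f hf2 (by omega) hfd
    nlinarith

lemma spf_two_le {n : Int} (hn : 2 ≤ n) : 2 ≤ spf n :=
  (spfAux_spec n hn 2 le_rfl (by omega)).1

lemma spf_dvd {n : Int} (hn : 2 ≤ n) : spf n ∣ n :=
  (spfAux_spec n hn 2 le_rfl (by omega)).2.1

lemma spf_min {n : Int} (hn : 2 ≤ n) {e : Int} (he : 2 ≤ e) (hed : e ∣ n) : spf n ≤ e :=
  (spfAux_spec n hn 2 le_rfl (by omega)).2.2 e he hed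

lemma spf_le_self {n : Int} (hn : 2 ≤ n) : spf n ≤ n := spf_min hn hn dvd_rfl

-- pointwise description of a single in-range write
lemma getD_setIfInBounds_int (a : Array Bool) (i x : Int) (h0 : 0 ≤ i) (h1 : i < (a.size : Int))
    (hx : 0 ≤ x) :
    (a.setIfInBounds i.toNat false).getD x.toNat false =
      if x = i then false else a.getD x.toNat false := by
  rw [Array.getD_eq_getD_getElem?, Array.getD_eq_getD_getElem?, Array.getElem?_setIfInBounds]
  by_cases h : x = i
  · subst h
    rw [if_pos rfl, if_pos (by omega), if_pos rfl]
    rfl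
  · have hne : i.toNat ≠ x.toNat := by omega
    rw [if_neg hne, if_neg h]

-- pointwise description of crossing out every element of C
lemma foldl_set_getD (C : List Int) : ∀ (isP : Array Bool) (x : Int), 0 ≤ x →
    (∀ j ∈ C, 0 ≤ j ∧ j < (isP.size : Int)) →
    (C.foldl (fun a j => a.setIfInBounds j.toNat false) isP).getD x.toNat false =
      (isP.getD x.toNat false && !(decide (x ∈ C))) := by
  induction C with
  | nil => intro isP x hx _; simp
  | cons j tl ih =>
    intro isP x hx hC
    have hj := hC j (by simp)
    have hlen : ((isP.setIfInBounds j.toNat false).size : Int) = isP.size := by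
      rw [Array.size_setIfInBounds]
    rw [List.foldl_cons, ih _ x hx (by intro a ha; rw [hlen]; exact hC a (by simp [ha])),
      getD_setIfInBounds_int isP j x hj.1 hj.2 hx]
    by_cases h : x = j
    · simp [h]
    · simp [h, List.mem_cons]

lemma foldl_set_size (C : List Int) : ∀ (isP : Array Bool),
    (C.foldl (fun a j => a.setIfInBounds j.toNat false) isP).size = isP.size := by
  induction C with
  | nil => intro isP; rfl
  | cons j tl ih => intro isP; rw [List.foldl_cons, ih, Array.size_setIfInBounds]

-- the inner loop: returns the (K-cnt)-th live multiple, else crosses them all out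
lemma innerA_eq (K : Int) : ∀ (js : List Int) (isP : Array Bool) (cnt : Int),
    js.Nodup → (∀ j ∈ js, 0 ≤ j ∧ j < (isP.size : Int)) →
    innerA K js isP cnt =
      (if cnt < K ∧ K ≤ cnt + (js.filter (fun j => isP.getD j.toNat false)).length then
        .inr ((js.filter (fun j => isP.getD j.toNat false)).getD (K - cnt - 1).toNat 0)
      else
        .inl ((js.filter (fun j => isP.getD j.toNat false)).foldl
                (fun a j => a.setIfInBounds j.toNat false) isP,
              cnt + (js.filter (fun j => isP.getD j.toNat false)).length)) := by
  intro js
  induction js with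
  | nil =>
    intro isP cnt _ _
    simp [innerA]
  | cons j tl ih =>
    intro isP cnt hnd hrange
    have hj := hrange j (by simp)
    have hnd' : tl.Nodup := (List.nodup_cons.mp hnd).2
    have hjtl : j ∉ tl := (List.nodup_cons.mp hnd).1
    by_cases hb : isP.getD j.toNat false = false
    · rw [innerA, if_pos hb]
      have hb' : isP[j.toNat]?.getD false = false := by
        rw [← Array.getD_eq_getD_getElem?]; exact hb
      have hfil : (j :: tl).filter (fun j => isP.getD j.toNat false) =
          tl.filter (fun j => isP.getD j.toNat false) := by
        simp [hb']
      rw [hfil, ih isP cnt hnd' (by intro a ha; exact hrange a (by simp [ha]))]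
    · rw [innerA, if_neg hb]
      have hbt : isP.getD j.toNat false = true := by
        revert hb; cases isP.getD j.toNat false <;> simp
      have hbt' : isP[j.toNat]?.getD false = true := by
        rw [← Array.getD_eq_getD_getElem?]; exact hbt
      have hfil : (j :: tl).filter (fun j => isP.getD j.toNat false) =
          j :: tl.filter (fun j => isP.getD j.toNat false) := by
        simp [hbt']
      rw [hfil]
      set isP' := isP.setIfInBounds j.toNat false with hisP'
      have hlen' : (isP'.size : Int) = isP.size := by
        rw [hisP', Array.size_setIfInBounds]
      have hfil' : tl.filter (fun j => isP'.getD j.toNat false) =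
          tl.filter (fun j => isP.getD j.toNat false) := by
        apply List.filter_congr
        intro a ha
        have hane : a ≠ j := by intro h; exact hjtl (h ▸ ha)
        have hra := hrange a (by simp [ha])
        rw [hisP', getD_setIfInBounds_int isP j a hj.1 hj.2 hra.1, if_neg hane]
      by_cases hK : cnt + 1 = K
      · rw [if_pos hK]
        have : cnt < K ∧ K ≤ cnt + (j :: tl.filter (fun j => isP.getD j.toNat false)).length := by
          simp only [List.length_cons]
          omega
        rw [if_pos this]
        have : (K - cnt - 1).toNat = 0 := by omega
        rw [this]
        rfl
      · rw [if_neg hK]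
        rw [ih isP' (cnt + 1) hnd' (by intro a ha; rw [hlen']; exact hrange a (by simp [ha]))]
        rw [hfil']
        set C' := tl.filter (fun j => isP.getD j.toNat false) with hC'
        by_cases hcond : cnt + 1 < K ∧ K ≤ cnt + 1 + C'.length
        · rw [if_pos hcond, if_pos (by simp only [List.length_cons]; omega)]
          have h1 : (K - cnt - 1).toNat = (K - (cnt + 1) - 1).toNat + 1 := by omega
          rw [h1]
          rfl
        · rw [if_neg hcond, if_neg (by simp only [List.length_cons]; omega)]
          simp only [List.length_cons, List.foldl_cons, Nat.cast_add, Nat.cast_one]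
          have harith : cnt + 1 + (C'.length : Int) = cnt + ((C'.length : Int) + 1) := by ring
          rw [harith]

-- membership in a block
lemma mem_blockL {N c j : Int} (hc : 2 ≤ c) :
    j ∈ blockL N c ↔ (spf j = c ∧ 2 ≤ j ∧ j < N + 1) := by
  unfold blockL
  rw [List.mem_filter]
  simp only [decide_eq_true_eq]
  constructor
  · rintro ⟨hmem, hspf⟩
    rw [PySem.List.mem_pyRange_iff_of_pos (by omega)] at hmem
    exact ⟨hspf, by omega, hmem.2.1⟩
  · rintro ⟨hspf, hj2, hjN⟩
    refine ⟨?_, hspf⟩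
    rw [PySem.List.mem_pyRange_iff_of_pos (by omega)]
    have hdvd : c ∣ j := hspf ▸ spf_dvd hj2
    have hle : c ≤ j := hspf ▸ spf_le_self hj2
    exact ⟨hle, hjN, dvd_sub hdvd dvd_rfl⟩

-- any range with positive step has no duplicates
lemma nodup_pyRange_pos (a b : Int) {s : Int} (hs : 0 < s) : (PySem.List.pyRange a b s).Nodup := by
  rw [PySem.List.pyRange_of_pos a b hs]
  refine List.Nodup.map ?_ (List.nodup_range)
  intro x y hxy
  have : s * (x : Int) = s * (y : Int) := by linarith
  exact_mod_cast mul_left_cancel₀ (ne_of_gt hs) this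

lemma peek_append (L1 L2 : List Int) (cnt K : Int)
    (h : ¬(cnt < K ∧ K ≤ cnt + (L1.length : Int))) :
    peek (L1 ++ L2) cnt K = peek L2 (cnt + (L1.length : Int)) K := by
  unfold peek
  by_cases hcnt : cnt < K
  · have hK : cnt + (L1.length : Int) < K := by omega
    rw [if_pos hcnt, if_pos (by omega)]
    rw [List.getElem?_append_right (by omega)]
    congr 1
    omega
  · rw [if_neg hcnt, if_neg (by omega)]

-- blocks over a cons of the outer range
lemma blocksL_cons (N c : Int) (h : c < N + 1) :
    blocksL N (PySem.List.pyRange c (N + 1) 1) =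
      blockL N c ++ blocksL N (PySem.List.pyRange (c + 1) (N + 1) 1) := by
  rw [PySem.List.pyRange_one_cons h]
  rfl

-- the outer loop computes peek of the remaining blocks
lemma outerA_eq (N K : Int) : ∀ (m : Nat) (c : Int), 2 ≤ c → (N + 1 - c).toNat = m →
    ∀ (prime : List Int) (isP : Array Bool) (cnt : Int),
    isP.size = (N + 1).toNat →
    (∀ j : Int, 2 ≤ j → j < N + 1 → isP.getD j.toNat false = decide (c ≤ spf j)) →
    outerA N K prime isP cnt (PySem.List.pyRange c (N + 1) 1) =
      peek (blocksL N (PySem.List.pyRange c (N + 1) 1)) cnt K := by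
  intro m
  induction m with
  | zero =>
    intro c hc hm prime isP cnt hlen hinv
    rw [PySem.List.pyRange_one_eq_nil (by omega)]
    simp only [outerA, blocksL, peek]
    split <;> simp
  | succ m ih =>
    intro c hc hm prime isP cnt hlen hinv
    have hcN : c < N + 1 := by omega
    have hlenI : (isP.size : Int) = N + 1 := by omega
    set js := PySem.List.pyRange c (N + 1) c with hjs
    have hmem : ∀ j, j ∈ js → c ≤ j ∧ j < N + 1 ∧ c ∣ j := by
      intro j hj
      rw [hjs, PySem.List.mem_pyRange_iff_of_pos (by omega)] at hj
      obtain ⟨h1, h2, h3⟩ := hj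
      refine ⟨h1, h2, ?_⟩
      have := dvd_add h3 (dvd_refl c)
      simpa using this
    have hnd : js.Nodup := nodup_pyRange_pos c (N + 1) (by omega)
    have hrange : ∀ j ∈ js, 0 ≤ j ∧ j < (isP.size : Int) := by
      intro j hj
      obtain ⟨h1, h2, _⟩ := hmem j hj
      omega
    have hfilter : js.filter (fun j => isP.getD j.toNat false) = blockL N c := by
      unfold blockL
      rw [← hjs]
      apply List.filter_congr
      intro j hj
      obtain ⟨h1, h2, h3⟩ := hmem j hj
      rw [hinv j (by omega) h2]
      have hle : spf j ≤ c := spf_min (by omega) hc h3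
      simp only [decide_eq_decide]
      omega
    have hres := innerA_eq K js isP cnt hnd hrange
    rw [hfilter] at hres
    have hunfold : outerA N K prime isP cnt (PySem.List.pyRange c (N + 1) 1) =
        (match innerA K js isP cnt with
        | .inr j => some j
        | .inl (isP', cnt') =>
            outerA N K (if isP.getD c.toNat false then prime ++ [c] else prime)
              isP' cnt' (PySem.List.pyRange (c + 1) (N + 1) 1)) := by
      rw [PySem.List.pyRange_one_cons hcN]
      rfl
    rw [hunfold, blocksL_cons N c hcN]
    by_cases hcond : cnt < K ∧ K ≤ cnt + ((blockL N c).length : Int)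
    · rw [if_pos hcond] at hres
      rw [hres]
      dsimp only
      unfold peek
      rw [if_pos hcond.1]
      have hidx : (K - cnt - 1).toNat < (blockL N c).length := by omega
      rw [List.getElem?_append_left hidx, List.getElem?_eq_getElem hidx,
        List.getD_eq_getElem (blockL N c) 0 hidx]
    · rw [if_neg hcond] at hres
      rw [hres]
      dsimp only
      have hCsub : ∀ j ∈ blockL N c, 0 ≤ j ∧ j < (isP.size : Int) := by
        intro j hj
        rw [mem_blockL hc] at hj
        omega
      rw [peek_append _ _ _ _ hcond]
      apply ih (c + 1) (by omega) (by omega)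
      · rw [foldl_set_size, hlen]
      · intro j hj2 hjN
        rw [foldl_set_getD _ isP j (by omega) hCsub, hinv j hj2 hjN]
        have hmemB : j ∈ blockL N c ↔ spf j = c := by
          rw [mem_blockL hc]
          constructor
          · exact fun h => h.1
          · exact fun h => ⟨h, hj2, hjN⟩
        by_cases h1 : c ≤ spf j <;> by_cases h2 : spf j = c <;>
          simp [h1, h2, hmemB] <;> omega

-- A computes peek of the full removal order
lemma primeFunc_eq_peek (N K : Int) :
    Prime_func N K = peek (blocksL N (PySem.List.pyRange 2 (N + 1) 1)) 0 K := by
  unfold Prime_func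
  apply outerA_eq N K (N + 1 - 2).toNat 2 (by omega) rfl
  · simp
  · intro j hj2 hjN
    rw [Array.getD_eq_getD_getElem?]
    rw [Array.getElem?_eq_getElem (by rw [Array.size_replicate]; omega)]
    simp [Array.getElem_replicate, spf_two_le hj2]

-- counting occurrences in the removal order
lemma count_blocksL (N : Int) : ∀ (m : Nat) (c : Int), 2 ≤ c → (N + 1 - c).toNat = m →
    ∀ j : Int, List.count j (blocksL N (PySem.List.pyRange c (N + 1) 1)) =
      if c ≤ spf j ∧ 2 ≤ j ∧ j < N + 1 then 1 else 0 := by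
  intro m
  induction m with
  | zero =>
    intro c hc hm j
    rw [PySem.List.pyRange_one_eq_nil (by omega)]
    simp only [blocksL, List.count_nil]
    rw [if_neg]
    rintro ⟨h1, h2, h3⟩
    have := spf_le_self h2
    omega
  | succ m ih =>
    intro c hc hm j
    have hcN : c < N + 1 := by omega
    rw [blocksL_cons N c hcN, List.count_append]
    have hndB : (blockL N c).Nodup :=
      List.Nodup.filter _ (nodup_pyRange_pos c (N + 1) (by omega))
    have hcount : List.count j (blockL N c) = if spf j = c ∧ 2 ≤ j ∧ j < N + 1 then 1 else 0 := by
      by_cases h : j ∈ blockL N c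
      · rw [List.count_eq_one_of_mem hndB h, if_pos ((mem_blockL hc).mp h)]
      · rw [List.count_eq_zero.mpr h, if_neg (fun hx => h ((mem_blockL hc).mpr hx))]
    rw [hcount, ih (c + 1) (by omega) (by omega) j]
    by_cases hj : 2 ≤ j ∧ j < N + 1
    · by_cases hsc : spf j = c
      · rw [if_pos ⟨hsc, hj⟩, if_neg (by rintro ⟨h, -⟩; omega), if_pos ⟨by omega, hj⟩]
      · by_cases hge : c + 1 ≤ spf j
        · rw [if_neg (by rintro ⟨h, -⟩; omega), if_pos ⟨hge, hj⟩, if_pos ⟨by omega, hj⟩]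
        · rw [if_neg (by rintro ⟨h, -⟩; omega), if_neg (by rintro ⟨h, -⟩; omega),
            if_neg (by rintro ⟨h, -⟩; omega)]
    · rw [if_neg (by rintro ⟨-, h⟩; exact hj h), if_neg (by rintro ⟨-, h⟩; exact hj h),
        if_neg (by rintro ⟨-, h⟩; exact hj h)]

lemma perm_blocksL (N : Int) :
    (blocksL N (PySem.List.pyRange 2 (N + 1) 1)).Perm (PySem.List.pyRange 2 (N + 1) 1) := by
  rw [List.perm_iff_count]
  intro j
  rw [count_blocksL N (N + 1 - 2).toNat 2 (by omega) rfl j]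
  have hnd : (PySem.List.pyRange 2 (N + 1) 1).Nodup := nodup_pyRange_pos 2 (N + 1) (by omega)
  by_cases h : j ∈ PySem.List.pyRange 2 (N + 1) 1
  · have hj := (PySem.List.mem_pyRange_one).mp h
    rw [List.count_eq_one_of_mem hnd h, if_pos ⟨spf_two_le hj.1, hj.1, hj.2⟩]
  · rw [List.count_eq_zero.mpr h, if_neg]
    rintro ⟨_, h2, h3⟩
    exact h (PySem.List.mem_pyRange_one.mpr ⟨h2, h3⟩)

-- B's group-skipping walk indexes the concatenation of the blocks
lemma selB_eq (N : Int) : ∀ (m : Nat) (c : Int), 2 ≤ c → (N + 1 - c).toNat = m →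
    ∀ k : Int, 1 ≤ k →
    selB N k (PySem.List.pyRange c (N + 1) 1) =
      (blocksL N (PySem.List.pyRange c (N + 1) 1))[(k - 1).toNat]? := by
  intro m
  induction m with
  | zero =>
    intro c hc hm k hk
    rw [PySem.List.pyRange_one_eq_nil (by omega)]
    simp [selB, blocksL]
  | succ m ih =>
    intro c hc hm k hk
    have hcN : c < N + 1 := by omega
    rw [blocksL_cons N c hcN, PySem.List.pyRange_one_cons hcN]
    show (if k ≤ ((blockL N c).length : Int) then PySem.List.pyGet? (blockL N c) (k - 1)
          else selB N (k - ((blockL N c).length : Int)) (PySem.List.pyRange (c + 1) (N + 1) 1)) = _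
    by_cases hcase : k ≤ ((blockL N c).length : Int)
    · rw [if_pos hcase, PySem.List.pyGet?_of_nonneg _ (by omega : 0 ≤ k - 1),
        List.getElem?_append_left (by omega)]
    · rw [if_neg hcase, ih (c + 1) (by omega) (by omega) _ (by omega),
        List.getElem?_append_right (by omega : (blockL N c).length ≤ (k - 1).toNat)]
      congr 1
      omega

theorem main_equiv (N K : Int) : Prime_func N K = Prime_func_alt N K := by
  rw [primeFunc_eq_peek N K]
  unfold Prime_func_alt
  have hlenR : ((blocksL N (PySem.List.pyRange 2 (N + 1) 1)).length : Int) = ((N + 1 - 2).toNat : Int) := by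
    rw [(perm_blocksL N).length_eq, PySem.List.length_pyRange_one]
  by_cases h1 : K < 1 ∨ N - 1 < K
  · rw [if_pos h1]
    unfold peek
    by_cases h2 : (0 : Int) < K
    · rw [if_pos h2]
      apply List.getElem?_eq_none
      omega
    · rw [if_neg h2]
  · rw [if_neg h1]
    push Not at h1
    rw [selB_eq N (N + 1 - 2).toNat 2 (by omega) rfl K (by omega)]
    unfold peek
    rw [if_pos (by omega : (0 : Int) < K)]
    norm_num

-- ===== VERDICT (by name: the statement is the Claim_ definition above) =====
theorem Prime_func_spec : Claim_equal_Prime_func := by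
  intro N K _
  unfold Spec_Prime_func
  exact main_equiv N K
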